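-- pv_equiv track=rewrite | github.com/Roman61/Urban_university_Lesson_Python | diplom_project/Demiurge/Generators/StateMachine/get_data.py | group_by_first_key
-- ===== SOURCE A (Python) =====
-- def group_by_first_key(data_list):
--     groups = {}
--
--     for item in data_list:
--         first_key = item['name'].split('_', 1)[0]
--         if first_key not in groups:
--             groups[first_key] = []
--         groups[first_key].append(item['name'])
--
--     return groups
-- ===== SOURCE B (Python) =====
-- def group_by_first_key(data_list):
--     names = [item['name'] for item in data_list]
--     keys = [n.split('_', 1)[0] for n in names]
--     return {k: [n for n, q in zip(names, keys) if q == k]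
--             for k in dict.fromkeys(keys)}
-- ===== Notes on version B (the rewrite author's own statement) =====
-- stated objective: simpler
-- what changed: Replaces the incremental dict-building loop (membership test, bucket creation, append) by a declarative two-pass form: extract all names/prefixes once, dedup the prefixes in first-seen order, and build each group with a per-key filter comprehension.
import Mathlib
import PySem

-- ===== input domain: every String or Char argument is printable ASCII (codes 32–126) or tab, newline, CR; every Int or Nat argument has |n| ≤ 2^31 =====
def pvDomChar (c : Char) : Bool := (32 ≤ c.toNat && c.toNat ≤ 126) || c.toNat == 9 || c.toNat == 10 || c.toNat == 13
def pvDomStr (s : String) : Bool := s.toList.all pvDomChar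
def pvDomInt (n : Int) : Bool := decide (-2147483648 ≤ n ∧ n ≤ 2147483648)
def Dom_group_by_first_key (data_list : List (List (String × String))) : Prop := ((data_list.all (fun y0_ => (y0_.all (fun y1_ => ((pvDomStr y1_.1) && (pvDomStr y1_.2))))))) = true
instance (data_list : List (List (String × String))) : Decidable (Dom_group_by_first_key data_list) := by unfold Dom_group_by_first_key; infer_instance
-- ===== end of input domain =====

-- B replaces A's incremental dict-building loop by: extract names and prefixes once,
-- dedup the prefixes in first-seen order, build each group by a per-key filter (objective: simpler).

-- ===== PORT A =====
-- item['name'] (KeyError when absent is excluded by Pre_, so getD "" is exact on Pre_)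
def pvName (item : List (String × String)) : String :=
  ((PySem.Dict.mk item).get? "name").getD ""

-- name.split('_', 1)[0]  (split with nonempty sep never returns none/[], so getD/headD are exact)
def pvFirstKey (name : String) : String :=
  (((PySem.Str.splitMax? name "_" 1).getD []).headD "")

def group_by_first_key (data_list : List (List (String × String))) : List (String × List String) :=
  (data_list.foldl
    (fun groups item =>
      let first_key := pvFirstKey (pvName item)
      let groups := if groups.contains first_key then groups
                    else groups.insert first_key ([] : List String)
      groups.modify first_key [] (· ++ [pvName item]))
    PySem.Dict.empty).items

-- ===== PORT B =====
def group_by_first_key_alt (data_list : List (List (String × String))) : List (String × List String) :=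
  let names := data_list.map pvName
  let keys := names.map pvFirstKey
  (PySem.List.dedup keys).map
    (fun k => (k, ((names.zip keys).filter (fun p => p.2 == k)).map (·.1)))

-- ===== PRECONDITION & SPEC =====
-- Pre_ excludes exactly the items without a 'name' key, on which A raises KeyError.
def Pre_group_by_first_key (data_list : List (List (String × String))) : Prop :=
  ∀ item ∈ data_list, ((PySem.Dict.mk item).contains "name") = true
instance (data_list : List (List (String × String))) : Decidable (Pre_group_by_first_key data_list) := by unfold Pre_group_by_first_key; infer_instance
def pvWitness_group_by_first_key : (List (List (String × String))) := ([[("name", "a_b")], [("name", "c")]])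

def Spec_group_by_first_key (data_list : List (List (String × String))) (out : List (String × List String)) : Prop := out = group_by_first_key_alt data_list
instance (data_list : List (List (String × String))) (out : List (String × List String)) : Decidable (Spec_group_by_first_key data_list out) := by unfold Spec_group_by_first_key; infer_instance

-- ===== CLAIM (what is proved, stated in full; the proofs are below) =====
def Claim_equal_group_by_first_key : Prop := ∀ (data_list : List (List (String × String))), Dom_group_by_first_key data_list → Pre_group_by_first_key data_list → Spec_group_by_first_key data_list (group_by_first_key data_list)

-- ===== LEMMAS AND PROOFS =====

-- A's ensure-then-append step is exactly Dict.modify with default [].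
theorem stepA_eq_modify (d : PySem.Dict String (List String)) (k n : String) :
    (if d.contains k then d else d.insert k ([] : List String)).modify k [] (· ++ [n])
      = d.modify k [] (· ++ [n]) := by
  by_cases h : d.contains k = true
  · simp [h]
  · simp [h, PySem.Dict.modify, PySem.Dict.insert_insert_self,
      PySem.Dict.getD_insert_self, PySem.Dict.getD_of_not_contains]

-- ===== VERDICT (by name: the statement is the Claim_ definition above) =====
theorem group_by_first_key_spec : Claim_equal_group_by_first_key := by
  unfold Claim_equal_group_by_first_key
  intro data_list _ _
  unfold Spec_group_by_first_key group_by_first_key group_by_first_key_alt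
  -- rewrite A's loop as a modify-fold over the (prefix, name) pairs
  have hfold :
      data_list.foldl
        (fun groups item =>
          let first_key := pvFirstKey (pvName item)
          let groups := if groups.contains first_key then groups
                        else groups.insert first_key ([] : List String)
          groups.modify first_key [] (· ++ [pvName item]))
        PySem.Dict.empty
      = (data_list.map (fun it => (pvFirstKey (pvName it), pvName it))).foldl
          (fun d p => d.modify p.1 [] (· ++ [p.2])) PySem.Dict.empty := by
    rw [List.foldl_map]
    simp only [stepA_eq_modify]
  rw [hfold]
  have hnd : ((data_list.map (fun it => (pvFirstKey (pvName it), pvName it))).foldl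
      (fun d p => d.modify p.1 [] (· ++ [p.2])) PySem.Dict.empty).keys.Nodup := by
    exact PySem.Dict.nodup_keys_foldl_modify_key _ _ _ _ _ PySem.Dict.nodup_keys_empty
  rw [PySem.Dict.items_eq_map_keys _ hnd []]
  rw [PySem.Dict.keys_foldl_modify_key]
  simp only [PySem.Dict.keys_empty, PySem.Set.update_nil_left, PySem.List.dedup_eq_ofList,
    PySem.Dict.getD_foldl_modify_append, PySem.Dict.getD_empty, List.map_map, List.nil_append,
    List.zip_map']
  simp [List.filter_map, List.map_map, Function.comp_def]
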